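-- pv_equiv track=rewrite | github.com/Defense-Hub/Algorithm-Study | 25.04.25/정은지_비밀 코드 해독.py | solution
-- ===== SOURCE A (Python) =====
-- from itertools import combinations
--
-- def check_valid_code(q,ans,code):
--     for i in range(len(q)):
--         cnt, q_list = ans[i], q[i]
--         intersection_cnt = len(set(q_list)&set(code))
--
--         if cnt != intersection_cnt:
--             return False
--
--     return True
--
-- def solution(n, q, ans):
--     answer = 0
--     m = len(q)
--     numbers= [i for i in range(1,n+1)]
--     generated_codes = list(combinations(numbers,5))
--
--     for code in generated_codes:
--         if check_valid_code(q,ans,code):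
--             answer += 1
--
--     return answer
-- ===== SOURCE B (Python) =====
-- def solution(n, q, ans):
--     m = len(q)
--     a = ans[:m]
--     qsets = [set(ql) for ql in q]
--
--     def rec(x, k, counts):
--         if any(c > t or c + k < t for c, t in zip(counts, a)):
--             return 0
--         if k == 0:
--             return 1 if counts == a else 0
--         if n - x + 1 < k:
--             return 0
--         bumped = [c + (1 if x in s else 0) for s, c in zip(qsets, counts)]
--         return rec(x + 1, k - 1, bumped) + rec(x + 1, k, counts)
--
--     return rec(1, 5, [0] * m)
-- ===== Notes on version B (the rewrite author's own statement) =====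
-- stated objective: alternative
-- what changed: Replaces materializing all C(n,5) combinations and recomputing every query's set intersection from scratch per code with a pruned depth-first search over 1..n that maintains per-query intersection counts incrementally and cuts branches whose counts already exceed, or can no longer reach, the targets.
-- outside the precondition, e.g. on solution(5, [[1], [2]], [9]): A returns 0, B returns 0
import Mathlib
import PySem

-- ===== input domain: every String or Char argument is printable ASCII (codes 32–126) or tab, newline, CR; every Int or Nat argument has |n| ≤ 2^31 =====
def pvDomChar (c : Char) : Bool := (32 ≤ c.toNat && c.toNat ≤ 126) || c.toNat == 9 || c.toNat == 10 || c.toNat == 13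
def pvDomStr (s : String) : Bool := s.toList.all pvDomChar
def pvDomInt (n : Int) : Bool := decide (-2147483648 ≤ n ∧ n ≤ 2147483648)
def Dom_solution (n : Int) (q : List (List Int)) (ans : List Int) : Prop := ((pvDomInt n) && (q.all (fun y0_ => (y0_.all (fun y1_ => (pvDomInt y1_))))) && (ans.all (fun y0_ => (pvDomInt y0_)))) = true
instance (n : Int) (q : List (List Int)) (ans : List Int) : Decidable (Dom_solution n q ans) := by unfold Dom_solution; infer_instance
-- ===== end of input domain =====

-- B replaces "materialize all C(n,5) combinations, re-check each query intersection from
-- scratch per code" by a pruned depth-first search with incrementally maintained per-query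
-- intersection counts (objective: alternative; return-value equivalence, no mutation involved).

-- ===== PORT A =====

-- len(set(q_list) & set(code))  (len of a set is order-independent, so porting through
-- PySem.Set is exact)
def interLen (ql code : List Int) : Int :=
  ((PySem.Set.inter (PySem.Set.ofList ql) (PySem.Set.ofList code)).length : Int)

-- the loop of check_valid_code over i in range(len(q)); ans[i] out of range is Python's
-- IndexError (excluded by Pre_), ported as `false` here
def checkGo (q : List (List Int)) (ans : List Int) (code : List Int) : List Int → Bool
  | [] => true
  | i :: rest =>
    match PySem.List.pyGet? ans i, PySem.List.pyGet? q i with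
    | some cnt, some ql =>
        if cnt ≠ interLen ql code then false else checkGo q ans code rest
    | _, _ => false

def checkValidCode (q : List (List Int)) (ans : List Int) (code : List Int) : Bool :=
  checkGo q ans code (PySem.List.pyRange 0 (q.length : Int) 1)

-- itertools.combinations(xs, k) (lexicographic: codes containing the head first)
def comb : List Int → Nat → List (List Int)
  | _, 0 => [[]]
  | [], _ + 1 => []
  | x :: xs, k + 1 => (comb xs k).map (fun c => x :: c) ++ comb xs (k + 1)

def solution (n : Int) (q : List (List Int)) (ans : List Int) : Int :=
  (comb (PySem.List.pyRange 1 (n + 1) 1) 5).foldl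
    (fun acc code => if checkValidCode q ans code then acc + 1 else acc) 0

-- ===== PORT B =====

def bumpB (qsets : List (PySem.Set Int)) (x : Int) (counts : List Int) : List Int :=
  (qsets.zip counts).map (fun p => p.2 + if PySem.Set.contains p.1 x then 1 else 0)

def pruneB (a : List Int) (k : Int) (counts : List Int) : Bool :=
  (counts.zip a).any (fun p => decide (p.2 < p.1) || decide (p.1 + k < p.2))

-- rec(x, k, counts); k is Python's remaining-picks counter 5,4,…,0, hence a Nat here
def recB (n : Int) (qsets : List (PySem.Set Int)) (a : List Int) (x : Int) (k : Nat)
    (counts : List Int) : Int :=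
  if pruneB a (k : Int) counts then 0
  else if k = 0 then (if counts = a then 1 else 0)
  else if n - x + 1 < (k : Int) then 0
  else recB n qsets a (x + 1) (k - 1) (bumpB qsets x counts) + recB n qsets a (x + 1) k counts
termination_by (n + 1 - x).toNat
decreasing_by all_goals (simp_wf; omega)

def solution_alt (n : Int) (q : List (List Int)) (ans : List Int) : Int :=
  -- ans[:m] with m = len(q) ≥ 0 is `take`
  recB n (q.map PySem.Set.ofList) (ans.take q.length) 1 5 (List.replicate q.length 0)

-- ===== PRECONDITION & SPEC =====
-- Pre_ excludes the inputs with fewer answers than queries (when n ≥ 5): there A's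
-- check loop reads ans[i] past the end and may raise IndexError mid-check; on the corner
-- inputs of that shape where an earlier constraint already fails for every code, A happens
-- to return 0 (so does B).
def Pre_solution (n : Int) (q : List (List Int)) (ans : List Int) : Prop :=
  n < 5 ∨ q.length ≤ ans.length
instance (n : Int) (q : List (List Int)) (ans : List Int) : Decidable (Pre_solution n q ans) := by
  unfold Pre_solution; infer_instance

def pvWitness_solution : Int × List (List Int) × List Int := (6, [[1, 2, 3]], [1])

def Spec_solution (n : Int) (q : List (List Int)) (ans : List Int) (out : Int) : Prop := out = solution_alt n q ans
instance (n : Int) (q : List (List Int)) (ans : List Int) (out : Int) : Decidable (Spec_solution n q ans out) := by unfold Spec_solution; infer_instance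

-- ===== CLAIM (what is proved, stated in full; the proofs are below) =====
def Claim_equal_solution : Prop := ∀ (n : Int) (q : List (List Int)) (ans : List Int), Dom_solution n q ans → Pre_solution n q ans → Spec_solution n q ans (solution n q ans)

-- ===== LEMMAS AND PROOFS =====

-- the common predicate both sides reduce to: counts c plus code's multiplicity-count per
-- query equals the target, jointly over the (query, target, count) triples
def okFrom : List (List Int) → List Int → List Int → List Int → Bool
  | ql :: qt, t :: ts, c :: cs, code =>
      (decide (c + (code.countP (fun y => decide (y ∈ ql)) : Int) = t)) && okFrom qt ts cs code
  | [], [], [], _ => true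
  | _, _, _, _ => false

theorem comb_eq_nil_of_lt {xs : List Int} {k : Nat} (h : xs.length < k) : comb xs k = [] := by
  induction xs generalizing k with
  | nil => cases k with
    | zero => omega
    | succ k => rfl
  | cons x xs ih =>
    cases k with
    | zero => omega
    | succ k =>
      simp only [comb]
      rw [ih (by simp at h; omega), ih (by simp at h ⊢; omega)]
      rfl

theorem length_of_mem_comb {xs : List Int} {k : Nat} {code : List Int}
    (h : code ∈ comb xs k) : code.length = k := by
  induction xs generalizing k code with
  | nil => cases k with
    | zero => simp [comb] at h; simp [h]
    | succ k => simp [comb] at h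
  | cons x xs ih =>
    cases k with
    | zero => simp [comb] at h; simp [h]
    | succ k =>
      simp only [comb, List.mem_append, List.mem_map] at h
      rcases h with ⟨c, hc, rfl⟩ | h
      · simp [ih hc]
      · exact ih h

theorem sublist_of_mem_comb {xs : List Int} {k : Nat} {code : List Int}
    (h : code ∈ comb xs k) : code.Sublist xs := by
  induction xs generalizing k code with
  | nil => cases k with
    | zero => simp [comb] at h; simp [h]
    | succ k => simp [comb] at h
  | cons x xs ih =>
    cases k with
    | zero => simp [comb] at h; simp [h]
    | succ k =>
      simp only [comb, List.mem_append, List.mem_map] at h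
      rcases h with ⟨c, hc, rfl⟩ | h
      · exact (ih hc).cons₂ x
      · exact (ih h).cons x

-- A's set-intersection size is the multiplicity count over a duplicate-free code
theorem interLen_eq_countP {ql code : List Int} (h : code.Nodup) :
    interLen ql code = (code.countP (fun y => decide (y ∈ ql)) : Int) := by
  unfold interLen
  have hperm : (PySem.Set.inter (PySem.Set.ofList ql) (PySem.Set.ofList code)).Perm
      (code.filter (fun y => decide (y ∈ ql))) := by
    rw [List.perm_ext_iff_of_nodup
      (PySem.Set.nodup_inter _ _ (PySem.Set.nodup_ofList ql)) (h.filter _)]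
    intro a
    simp [PySem.Set.mem_inter, PySem.Set.mem_ofList, List.mem_filter, and_comm]
  rw [hperm.length_eq, List.countP_eq_length_filter]

-- A's early-exit indexed loop equals okFrom-with-interLen on the aligned suffixes
def okFromA : List (List Int) → List Int → List Int → Bool
  | ql :: qt, t :: ts, code => (decide (t = interLen ql code)) && okFromA qt ts code
  | _, _, _ => true

theorem checkGo_range (q : List (List Int)) (ans code : List Int)
    (hlen : q.length ≤ ans.length) :
    ∀ (k j : Nat), j + k = q.length →
      checkGo q ans code (PySem.List.pyRange (j : Int) (q.length : Int) 1) =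
        okFromA (q.drop j) ((ans.take q.length).drop j) code := by
  intro k
  induction k with
  | zero =>
    intro j hj
    rw [PySem.List.pyRange_one_eq_nil (by omega)]
    have h1 : q.drop j = [] := by rw [List.drop_eq_nil_iff]; omega
    have h2 : (ans.take q.length).drop j = [] := by rw [List.drop_eq_nil_iff]; simp; omega
    simp [checkGo, h1, h2, okFromA]
  | succ k ih =>
    intro j hj
    have hjq : j < q.length := by omega
    have hja : j < ans.length := by omega
    have hjt : j < (ans.take q.length).length := by simp; omega
    rw [PySem.List.pyRange_one_cons (by exact_mod_cast hjq)]
    have hcast : ((j : Int) + 1) = ((j + 1 : Nat) : Int) := by push_cast; ring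
    simp only [checkGo, PySem.List.pyGet?_natCast, List.getElem?_eq_getElem hja,
      List.getElem?_eq_getElem hjq]
    rw [hcast, ih (j + 1) (by omega)]
    rw [List.drop_eq_getElem_cons hjq, List.drop_eq_getElem_cons hjt]
    simp only [okFromA, List.getElem_take]
    by_cases hc : ans[j]'hja = interLen (q[j]'hjq) code
    · simp [hc]
    · simp [hc]

theorem checkValidCode_eq_okFromA (q : List (List Int)) (ans code : List Int)
    (hlen : q.length ≤ ans.length) :
    checkValidCode q ans code = okFromA q (ans.take q.length) code := by
  have := checkGo_range q ans code hlen q.length 0 (by omega)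
  simpa [checkValidCode] using this

theorem okFromA_eq_okFrom {code : List Int} (hnd : code.Nodup) :
    ∀ (q : List (List Int)) (a : List Int), a.length = q.length →
      okFromA q a code = okFrom q a (List.replicate q.length 0) code := by
  intro q
  induction q with
  | nil => intro a ha; cases a with
    | nil => rfl
    | cons t ts => simp at ha
  | cons ql qt ih =>
    intro a ha
    cases a with
    | nil => simp at ha
    | cons t ts =>
      simp only [okFromA, List.length_cons, List.replicate_succ, okFrom,
        interLen_eq_countP hnd]
      rw [ih ts (by simpa using ha)]
      have : (decide (t = (code.countP (fun y => decide (y ∈ ql)) : Int))) =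
          (decide ((0 : Int) + (code.countP (fun y => decide (y ∈ ql)) : Int) = t)) := by
        rcases eq_or_ne t ((code.countP (fun y => decide (y ∈ ql)) : Int)) with h | h
        · simp [h]
        · simp [h, Ne.symm h]
      rw [this]

-- okFrom on the empty code is list equality of counts and targets
theorem okFrom_nil {q : List (List Int)} : ∀ {a c : List Int},
    a.length = q.length → c.length = q.length → okFrom q a c [] = decide (c = a) := by
  induction q with
  | nil =>
    intro a c ha hc
    rw [List.length_eq_zero_iff.mp ha, List.length_eq_zero_iff.mp hc]
    rfl
  | cons ql qt ih =>
    intro a c ha hc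
    cases a with
    | nil => simp at ha
    | cons t ts =>
      cases c with
      | nil => simp at hc
      | cons cc cs =>
        simp only [okFrom, List.countP_nil]
        rw [ih (by simpa using ha) (by simpa using hc)]
        rcases eq_or_ne cc t with h | h
        · rcases eq_or_ne cs ts with h2 | h2 <;> simp [h, h2]
        · simp [h]

-- taking x turns okFrom's counts into the bumped counts
theorem okFrom_cons {x : Int} {code : List Int} :
    ∀ (q : List (List Int)) (a c : List Int), c.length = q.length →
      okFrom q a c (x :: code) = okFrom q a (bumpB (q.map PySem.Set.ofList) x c) code := by
  intro q
  induction q with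
  | nil =>
    intro a c hc
    rw [List.length_eq_zero_iff.mp hc]
    cases a <;> rfl
  | cons ql qt ih =>
    intro a c hc
    cases c with
    | nil => simp at hc
    | cons cc cs =>
      cases a with
      | nil => rfl
      | cons t ts =>
        have htail := ih ts cs (by simpa using hc)
        simp only [okFrom, bumpB, List.map_cons, List.zip_cons_cons, List.countP_cons]
        -- congr closes the tail conjunct from htail (definitionally); the head remains
        congr 1
        rw [decide_eq_decide]
        have hmem : PySem.Set.contains (PySem.Set.ofList ql) x = decide (x ∈ ql) := by
          by_cases h : x ∈ ql <;> simp [PySem.Set.mem_ofList, h]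
        rw [hmem]
        by_cases h : x ∈ ql
        all_goals simp only [h, decide_true, decide_false, if_true]
        all_goals (try push_cast)
        all_goals omega

theorem bumpB_length (qsets : List (PySem.Set Int)) (x : Int) (c : List Int) :
    (bumpB qsets x c).length = min qsets.length c.length := by
  simp [bumpB]

-- a pruned state admits no completing code of the right length
theorem okFrom_false_of_prune {k : Nat} {code : List Int} (hcode : code.length = k) :
    ∀ (q : List (List Int)) (a c : List Int), a.length = q.length → c.length = q.length →
      pruneB a (k : Int) c = true → okFrom q a c code = false := by
  intro q
  induction q with
  | nil =>
    intro a c ha hc hp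
    rw [List.length_eq_zero_iff.mp ha, List.length_eq_zero_iff.mp hc] at hp
    simp [pruneB] at hp
  | cons ql qt ih =>
    intro a c ha hc hp
    cases a with
    | nil => simp at ha
    | cons t ts =>
      cases c with
      | nil => simp at hc
      | cons cc cs =>
        simp only [pruneB, List.zip_cons_cons, List.any_cons, Bool.or_eq_true,
          decide_eq_true_eq] at hp
        simp only [okFrom]
        rcases hp with hhead | htail
        · have hle : code.countP (fun y => decide (y ∈ ql)) ≤ k := by
            rw [← hcode]; exact List.countP_le_length
          have : ¬ (cc + (code.countP (fun y => decide (y ∈ ql)) : Int) = t) := by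
            have h0 : 0 ≤ (code.countP (fun y => decide (y ∈ ql)) : Int) := by positivity
            have h1 : (code.countP (fun y => decide (y ∈ ql)) : Int) ≤ (k : Int) := by
              exact_mod_cast hle
            omega
          simp [this]
        · rw [ih ts cs (by simpa using ha) (by simpa using hc) (by simp [pruneB, htail])]
          simp

-- the backtracking search counts exactly the completing codes among comb of the tail range
theorem recB_eq_countP (n : Int) (q : List (List Int)) (a : List Int)
    (ha : a.length = q.length) :
    ∀ (fuel : Nat) (x : Int) (k : Nat) (c : List Int), (n + 1 - x).toNat ≤ fuel →
      c.length = q.length →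
      recB n (q.map PySem.Set.ofList) a x k c =
        (((comb (PySem.List.pyRange x (n + 1) 1) k).countP (okFrom q a c)) : Int) := by
  intro fuel
  induction fuel with
  | zero =>
    intro x k c hfuel hc
    rw [recB]
    have hnil : PySem.List.pyRange x (n + 1) 1 = [] :=
      PySem.List.pyRange_one_eq_nil (by omega)
    rw [hnil]
    by_cases hp : pruneB a (k : Int) c = true
    · rw [if_pos hp]
      cases k with
      | zero =>
        have hne : ¬ (c = a) := by
          intro hca; subst hca
          simp only [pruneB, List.any_eq_true, Bool.or_eq_true, decide_eq_true_eq] at hp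
          obtain ⟨p, hmem, hbad⟩ := hp
          have hpp : p.1 = p.2 := by
            have hz : ∀ (l : List Int) (p : Int × Int), p ∈ l.zip l → p.1 = p.2 := by
              intro l
              induction l with
              | nil => intro p hp; simp at hp
              | cons v vs ihz =>
                intro p hp
                rcases List.mem_cons.mp hp with h | h
                · simp [h]
                · exact ihz p h
            exact hz _ p hmem
          omega
        have hpfalse : okFrom q a c [] = false := by rw [okFrom_nil ha hc]; simp [hne]
        simp [comb, hpfalse]
      | succ k => simp [comb]
    · rw [if_neg hp]
      have hpf : pruneB a (k : Int) c = false := by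
        cases hpb : pruneB a (k : Int) c
        · rfl
        · exact absurd hpb hp
      cases k with
      | zero =>
        rw [if_pos rfl]
        simp only [comb, List.countP_cons, List.countP_nil, okFrom_nil ha hc]
        by_cases hca : c = a <;> simp [hca]
      | succ k =>
        rw [if_neg (by simp), if_pos (by omega)]
        simp [comb]
  | succ fuel ih =>
    intro x k c hfuel hc
    rw [recB]
    by_cases hp : pruneB a (k : Int) c = true
    · rw [if_pos hp]
      have hzero : (comb (PySem.List.pyRange x (n + 1) 1) k).countP (okFrom q a c) = 0 := by
        rw [List.countP_eq_zero]
        intro code hcode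
        simp [okFrom_false_of_prune (length_of_mem_comb hcode) q a c ha hc hp]
      rw [hzero]; rfl
    · rw [if_neg hp]
      cases k with
      | zero =>
        rw [if_pos rfl]
        simp only [comb]
        rw [List.countP_cons, List.countP_nil, okFrom_nil ha hc]
        by_cases hca : c = a <;> simp [hca]
      | succ k =>
        rw [if_neg (by simp)]
        by_cases hrange : n - x + 1 < ((k + 1 : Nat) : Int)
        · rw [if_pos hrange]
          rw [comb_eq_nil_of_lt, List.countP_nil]
          · rfl
          · rw [PySem.List.length_pyRange_one]; omega
        · rw [if_neg hrange]
          have hxn : x < n + 1 := by push_cast at hrange; omega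
          rw [PySem.List.pyRange_one_cons hxn]
          simp only [comb, List.countP_append, List.countP_map]
          have hmap : ((comb (PySem.List.pyRange (x + 1) (n + 1) 1) k).countP
                ((okFrom q a c) ∘ (fun code => x :: code))) =
              ((comb (PySem.List.pyRange (x + 1) (n + 1) 1) k).countP
                (okFrom q a (bumpB (q.map PySem.Set.ofList) x c))) := by
            apply List.countP_congr
            intro code _
            simp only [Function.comp_apply]
            rw [okFrom_cons q a c hc]
          simp only [Nat.add_sub_cancel]
          rw [hmap,
            ih (x + 1) k (bumpB (q.map PySem.Set.ofList) x c) (by omega)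
              (by rw [bumpB_length]; simp [hc]),
            ih (x + 1) (k + 1) c (by omega) hc]
          push_cast
          ring

-- the counting fold of A is a countP
theorem foldl_count (q : List (List Int)) (ans : List Int) (l : List (List Int)) :
    l.foldl (fun acc code => if checkValidCode q ans code then acc + 1 else acc) 0 =
      ((l.countP (checkValidCode q ans)) : Int) := by
  simpa using PySem.List.foldl_if_add_one (checkValidCode q ans) l 0

-- ===== VERDICT (by name: the statement is the Claim_ definition above) =====
theorem solution_spec : Claim_equal_solution := by
  intro n q ans _ hpre
  unfold Spec_solution solution solution_alt
  rcases Classical.em (q.length ≤ ans.length) with hlen | hlen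
  · -- main case: enough answers
    rw [foldl_count]
    have htake : (ans.take q.length).length = q.length := by simp; omega
    rw [recB_eq_countP n q (ans.take q.length) htake ((n + 1 - 1).toNat) 1 5
      (List.replicate q.length 0) (le_refl _) (by simp)]
    congr 1
    apply List.countP_congr
    intro code hcode
    have hnd : code.Nodup :=
      (sublist_of_mem_comb hcode).nodup (PySem.List.nodup_pyRange_one 1 (n + 1))
    rw [checkValidCode_eq_okFromA q ans code hlen,
      okFromA_eq_okFrom hnd q (ans.take q.length) htake]
  · -- Pre_ forces n < 5: both sides are 0
    have hn : n < 5 := by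
      rcases hpre with h | h
      · exact h
      · exact absurd h hlen
    have hcomb : comb (PySem.List.pyRange 1 (n + 1) 1) 5 = [] := by
      apply comb_eq_nil_of_lt
      rw [PySem.List.length_pyRange_one]; omega
    rw [hcomb]
    rw [recB]
    rw [show ((5 : Nat) : Int) = (5 : Int) from rfl]
    by_cases hp : pruneB (ans.take q.length) 5 (List.replicate q.length 0) = true
    · rw [if_pos hp]; rfl
    · rw [if_neg hp, if_neg (by simp), if_pos (by omega)]; rfl
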